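-- pv_equiv track=rewrite | github.com/MRKDaGods/gp | scripts/rebuild_09d_notebook.py | strip_leading_imports
-- ===== SOURCE A (Python) =====
-- def strip_leading_imports(text: str) -> str:
--     cleaned_lines: list[str] = []
--     in_leading_block = True
--     for line in text.splitlines():
--         stripped = line.strip()
--         if in_leading_block and (stripped.startswith("import ") or stripped.startswith("from ")):
--             continue
--         if in_leading_block and not stripped:
--             continue
--         if stripped and not stripped.startswith("#"):
--             in_leading_block = False
--         cleaned_lines.append(line)
--     return "\n".join(cleaned_lines).strip()
-- ===== SOURCE B (Python) =====
-- def strip_leading_imports(text: str) -> str: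
--     lines = text.splitlines()
--
--     def _is_boundary(line: str) -> bool:
--         s = line.strip()
--         return bool(s) and not s.startswith("#") and not s.startswith("import ") and not s.startswith("from ")
--
--     boundary = next((i for i, l in enumerate(lines) if _is_boundary(l)), len(lines))
--     kept = [
--         l for i, l in enumerate(lines)
--         if i >= boundary
--         or (l.strip() and not l.strip().startswith("import ") and not l.strip().startswith("from "))
--     ]
--     return "\n".join(kept).strip()
-- ===== Notes on version B (the rewrite author's own statement) =====
-- stated objective: alternative
-- what changed: Replaces A's single stateful scan with a mutable in_leading_block flag by a two-phase computation: first find the boundary index of the first non-blank, non-comment, non-import line (default len(lines)), then keep lines with a stateless index-based filter over enumerate.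
import Mathlib
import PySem

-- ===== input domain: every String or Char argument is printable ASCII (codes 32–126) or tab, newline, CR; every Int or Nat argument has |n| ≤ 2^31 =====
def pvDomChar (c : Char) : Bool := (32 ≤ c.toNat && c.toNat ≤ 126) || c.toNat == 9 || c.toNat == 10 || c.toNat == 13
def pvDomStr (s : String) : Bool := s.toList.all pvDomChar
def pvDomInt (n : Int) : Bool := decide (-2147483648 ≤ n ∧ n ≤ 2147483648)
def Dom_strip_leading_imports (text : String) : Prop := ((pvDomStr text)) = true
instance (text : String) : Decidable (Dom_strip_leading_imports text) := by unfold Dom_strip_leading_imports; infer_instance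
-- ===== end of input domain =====

-- B replaces A's single stateful scan (a mutable flag) by a two-phase boundary-index + stateless filter; same O(n) cost.


-- ===== PORT A =====
-- one loop iteration of A: state = (cleaned_lines, in_leading_block)
def pvAStep (st : List String × Bool) (line : String) : List String × Bool :=
  let stripped := PySem.Str.strip line
  if st.2 && (PySem.Str.startswith stripped "import " || PySem.Str.startswith stripped "from ") then st
  else if st.2 && (stripped == "") then st
  else if (stripped != "") && !(PySem.Str.startswith stripped "#") then (st.1 ++ [line], false)
  else (st.1 ++ [line], st.2)

def strip_leading_imports (text : String) : String :=
  let r := (PySem.Str.splitlines text).foldl pvAStep ([], true)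
  PySem.Str.strip (PySem.Str.join "\n" r.1)

-- ===== PORT B =====
-- B's prefix-keep predicate: stripped form nonempty and not an import/from line
def pvKeep (line : String) : Bool :=
  let s := PySem.Str.strip line
  (s != "") && !(PySem.Str.startswith s "import ") && !(PySem.Str.startswith s "from ")

-- B's _is_boundary
def pvIsBoundary (line : String) : Bool :=
  let s := PySem.Str.strip line
  (s != "") && !(PySem.Str.startswith s "#") && !(PySem.Str.startswith s "import ") && !(PySem.Str.startswith s "from ")

def strip_leading_imports_alt (text : String) : String :=
  let lines := PySem.Str.splitlines text
  let boundary : Int :=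
    (((PySem.List.enumerate lines).find? (fun p => pvIsBoundary p.2)).map (·.1)).getD (lines.length : Int)
  let kept := (PySem.List.enumerate lines).filterMap
    (fun p => if boundary ≤ p.1 || pvKeep p.2 then some p.2 else none)
  PySem.Str.strip (PySem.Str.join "\n" kept)

-- ===== PRECONDITION & SPEC =====
def Spec_strip_leading_imports (text : String) (out : String) : Prop := out = strip_leading_imports_alt text
instance (text : String) (out : String) : Decidable (Spec_strip_leading_imports text out) := by unfold Spec_strip_leading_imports; infer_instance

-- ===== CLAIM (what is proved, stated in full; the proofs are below) =====
def Claim_equal_strip_leading_imports : Prop := ∀ (text : String), Dom_strip_leading_imports text → Spec_strip_leading_imports text (strip_leading_imports text)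

-- ===== LEMMAS AND PROOFS =====

-- boundary of the suffix starting at index s (generalisation of B's boundary)
def pvBoundary (s : Int) (ls : List String) : Int :=
  (((PySem.List.enumerate ls s).find? (fun p => pvIsBoundary p.2)).map (·.1)).getD (s + ls.length)

-- B's kept-lines computation with explicit boundary b and start index s
def pvKeptB (b s : Int) (ls : List String) : List String :=
  (PySem.List.enumerate ls s).filterMap (fun p => if b ≤ p.1 || pvKeep p.2 then some p.2 else none)

lemma pvBoundary_ge (s : Int) (ls : List String) : s ≤ pvBoundary s ls := by
  induction ls generalizing s with
  | nil => simp [pvBoundary]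
  | cons l t ih =>
    simp only [pvBoundary, PySem.List.enumerate_cons, List.find?_cons]
    by_cases h : pvIsBoundary l = true
    · simp [h]
    · simp only [h]
      have := ih (s + 1)
      simp only [pvBoundary] at this
      simp only [List.length_cons]
      cases hf : (PySem.List.enumerate t (s + 1)).find? (fun p => pvIsBoundary p.2) with
      | none => simp [hf] at this ⊢; omega
      | some p => simp [hf] at this ⊢; omega

lemma pvBoundary_cons_not (s : Int) (l : String) (t : List String)
    (h : pvIsBoundary l = false) : pvBoundary s (l :: t) = pvBoundary (s + 1) t := by
  simp only [pvBoundary, PySem.List.enumerate_cons, List.find?_cons, h]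
  cases hf : (PySem.List.enumerate t (s + 1)).find? (fun p => pvIsBoundary p.2) with
  | none => simp [List.length_cons]; omega
  | some p => simp

lemma pvKeptB_all (b s : Int) (ls : List String) (h : b ≤ s) : pvKeptB b s ls = ls := by
  induction ls generalizing s with
  | nil => simp [pvKeptB]
  | cons l t ih =>
    have := ih (s + 1) (by omega)
    simp only [pvKeptB] at this ⊢
    simp only [PySem.List.enumerate_cons, List.filterMap_cons]
    rw [if_pos (by simp [h])]
    rw [this]

lemma pvFoldl_false (ls acc : List String) :
    ls.foldl pvAStep (acc, false) = (acc ++ ls, false) := by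
  induction ls generalizing acc with
  | nil => simp
  | cons l t ih =>
    simp only [List.foldl_cons]
    have hstep : pvAStep (acc, false) l = (acc ++ [l], false) := by
      simp only [pvAStep]
      split <;> simp_all
    rw [hstep, ih]
    simp

lemma pvMain (ls : List String) (s : Int) (acc : List String) :
    (ls.foldl pvAStep (acc, true)).1 = acc ++ pvKeptB (pvBoundary s ls) s ls := by
  induction ls generalizing s acc with
  | nil => simp [pvKeptB]
  | cons l t ih =>
    by_cases hB : pvIsBoundary l = true
    · -- boundary line: A appends l and turns the flag off; B keeps everything from here
      have hs : pvBoundary s (l :: t) = s := by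
        simp [pvBoundary, PySem.List.enumerate_cons, hB]
      have hne : (PySem.Str.strip l != "") = true := by
        simp only [pvIsBoundary] at hB; exact (Bool.and_eq_true_iff.mp
          (Bool.and_eq_true_iff.mp (Bool.and_eq_true_iff.mp hB).1).1).1
      have hH : (!PySem.Str.startswith (PySem.Str.strip l) "#") = true := by
        simp only [pvIsBoundary] at hB; exact (Bool.and_eq_true_iff.mp
          (Bool.and_eq_true_iff.mp (Bool.and_eq_true_iff.mp hB).1).1).2
      have hI : (PySem.Str.startswith (PySem.Str.strip l) "import ") = false := by
        simp only [pvIsBoundary] at hB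
        have := (Bool.and_eq_true_iff.mp (Bool.and_eq_true_iff.mp hB).1).2; simpa using this
      have hF : (PySem.Str.startswith (PySem.Str.strip l) "from ") = false := by
        simp only [pvIsBoundary] at hB
        have := (Bool.and_eq_true_iff.mp hB).2; simpa using this
      have hstep : pvAStep (acc, true) l = (acc ++ [l], false) := by
        simp [pvAStep]
        simp_all
      rw [List.foldl_cons, hstep, pvFoldl_false, hs, pvKeptB_all _ _ _ (le_refl s)]
      simp
    · -- not a boundary line: flag stays true; A keeps l iff pvKeep l
      have hB' : pvIsBoundary l = false := by simpa using hB
      have hbnd := pvBoundary_cons_not s l t hB'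
      have hge : s + 1 ≤ pvBoundary (s + 1) t := pvBoundary_ge (s + 1) t
      have hstep : pvAStep (acc, true) l = (acc ++ (if pvKeep l then [l] else []), true) := by
        simp only [pvAStep, pvKeep]
        by_cases hI : (PySem.Str.startswith (PySem.Str.strip l) "import "
            || PySem.Str.startswith (PySem.Str.strip l) "from ") = true
        · simp at hI; rcases hI with hI | hI <;> simp [hI]
        · simp only [Bool.true_and, hI]
          by_cases hE : (PySem.Str.strip l == "") = true
          · simp only [hE, if_true]
            have : (PySem.Str.strip l != "") = false := by simpa using hE
            simp [this]
          · have hne : (PySem.Str.strip l != "") = true := by simpa using hE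
            have hH : PySem.Str.startswith (PySem.Str.strip l) "#" = true := by
              simp only [pvIsBoundary] at hB'
              simp only [hne, Bool.true_and] at hB'
              simp at hI
              simp [hI.1, hI.2] at hB'
              simpa using hB'
            simp only [Bool.false_eq_true, if_false, hne, hH, Bool.not_true, Bool.and_false,
              if_false, Bool.true_and]
            simp at hI
            have : ¬ PySem.Str.strip l = "" := fun hc => hE (by simp [hc])
            simp [hI.1, hI.2, this]
      rw [List.foldl_cons, hstep, ih (s + 1)]
      have hhead : pvKeptB (pvBoundary s (l :: t)) s (l :: t)
          = (if pvKeep l then [l] else []) ++ pvKeptB (pvBoundary (s + 1) t) (s + 1) t := by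
        simp only [pvKeptB, PySem.List.enumerate_cons, List.filterMap_cons, hbnd]
        have : ¬ (pvBoundary (s + 1) t ≤ s) := by omega
        by_cases hk : pvKeep l = true
        · simp [hk]
        · simp [hk, this]
      rw [hhead, List.append_assoc]

-- ===== VERDICT (by name: the statement is the Claim_ definition above) =====
theorem strip_leading_imports_spec : Claim_equal_strip_leading_imports := by
  intro text _
  unfold Spec_strip_leading_imports
  have h := pvMain (PySem.Str.splitlines text) 0 []
  simp only [strip_leading_imports, strip_leading_imports_alt]
  rw [h]
  simp [pvKeptB, pvBoundary]
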